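-- pv_equiv track=rewrite | github.com/pablomarcel/control-systems | state_space_design/robustTool/cli.py | _normalize_argv
-- ===== SOURCE A (Python) =====
-- def _normalize_argv(argv: list[str] | None) -> list[str] | None:
--     """
--     Normalize argv to be resilient to values that *start with '-'* (Oh My Zsh quirks).
--     Strategy: for known string options that expect a value, if the next token
--     begins with '-', attach it using the '--opt=value' form.
--     """
--     if argv is None:
--         return None
--     expects_value = {
--         "--num", "--den",
--         "--pid", "--K_num", "--K_den",
--         "--Wm_num", "--Wm_den",
--         "--Ws_num", "--Ws_den",
--         "--Wa_num", "--Wa_den",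
--         "--export-json",
--     }
--     out: list[str] = []
--     i = 0
--     while i < len(argv):
--         tok = argv[i]
--         if tok in expects_value and (i + 1) < len(argv):
--             nxt = argv[i + 1]
--             if nxt.startswith("-") and not nxt.replace("-", "").isdigit():
--                 # attach as --opt=value to avoid argparse thinking it's a flag
--                 out.append(f"{tok}={nxt}")
--                 i += 2
--                 continue
--         out.append(tok)
--         i += 1
--     return out
-- ===== SOURCE B (Python) =====
-- def _normalize_argv(argv):
--     """Single forward pass keeping a 'pending' option buffer instead of index lookahead."""
--     if argv is None:
--         return None
--     expects_value = {
--         "--num", "--den",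
--         "--pid", "--K_num", "--K_den",
--         "--Wm_num", "--Wm_den",
--         "--Ws_num", "--Ws_den",
--         "--Wa_num", "--Wa_den",
--         "--export-json",
--     }
--
--     def attachable(tok: str) -> bool:
--         return tok.startswith("-") and not tok.replace("-", "").isdigit()
--
--     out = []
--     pending = None
--     for tok in argv:
--         if pending is not None:
--             if attachable(tok):
--                 out.append(f"{pending}={tok}")
--                 pending = None
--                 continue
--             out.append(pending)
--             pending = None
--         if tok in expects_value:
--             pending = tok
--         else:
--             out.append(tok)
--     if pending is not None:
--         out.append(pending)
--     return out
-- ===== Notes on version B (the rewrite author's own statement) =====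
-- stated objective: alternative
-- what changed: Replaced A's index-based while loop with i+=1/i+=2 lookahead by a single forward pass that carries a 'pending' option buffer, deciding attachment when the next token arrives and flushing a trailing pending option after the loop.
import Mathlib
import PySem

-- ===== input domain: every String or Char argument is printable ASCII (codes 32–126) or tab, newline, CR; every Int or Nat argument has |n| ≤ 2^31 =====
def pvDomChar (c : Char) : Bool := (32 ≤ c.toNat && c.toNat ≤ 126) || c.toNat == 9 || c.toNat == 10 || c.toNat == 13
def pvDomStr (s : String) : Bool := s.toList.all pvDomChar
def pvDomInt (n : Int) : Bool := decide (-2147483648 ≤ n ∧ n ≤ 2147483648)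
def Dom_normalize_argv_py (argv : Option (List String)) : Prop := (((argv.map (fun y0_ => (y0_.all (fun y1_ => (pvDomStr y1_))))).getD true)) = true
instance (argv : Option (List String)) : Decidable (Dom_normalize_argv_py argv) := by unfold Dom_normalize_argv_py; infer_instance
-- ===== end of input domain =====

-- B is a single forward pass with a 'pending' option buffer instead of A's index lookahead; same return value (alternative decomposition, no speed claim).

-- ===== PORT A =====
-- the set literal `expects_value` (identical in both Pythons)
def pvExpects : List String :=
  ["--num", "--den", "--pid", "--K_num", "--K_den", "--Wm_num", "--Wm_den",
   "--Ws_num", "--Ws_den", "--Wa_num", "--Wa_den", "--export-json"]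

-- `nxt.startswith("-") and not nxt.replace("-", "").isdigit()` (identical in both Pythons)
def pvDashTest (s : String) : Bool :=
  PySem.Str.startswith s "-" && !(PySem.Str.strIsdigit (PySem.Str.replace s "-" ""))

-- A's while-loop over index i: structural recursion consuming one or two tokens per step
def pvLoopA : List String → List String
  | [] => []
  | [tok] => [tok]          -- tok in expects_value but i+1 = len: plain append
  | tok :: nxt :: rest =>
      if pvExpects.contains tok && pvDashTest nxt then
        (tok ++ "=" ++ nxt) :: pvLoopA rest
      else
        tok :: pvLoopA (nxt :: rest)

def normalize_argv_py (argv : Option (List String)) : Option (List String) :=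
  match argv with
  | none => none
  | some l => some (pvLoopA l)

-- ===== PORT B =====
-- B's for-loop carrying the `pending` buffer; trailing pending is flushed at [].
def pvLoopB : Option String → List String → List String
  | some p, [] => [p]
  | none, [] => []
  | some p, tok :: rest =>
      if pvDashTest tok then (p ++ "=" ++ tok) :: pvLoopB none rest
      else p :: (if pvExpects.contains tok then pvLoopB (some tok) rest
                 else tok :: pvLoopB none rest)
  | none, tok :: rest =>
      if pvExpects.contains tok then pvLoopB (some tok) rest
      else tok :: pvLoopB none rest

def normalize_argv_py_alt (argv : Option (List String)) : Option (List String) :=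
  match argv with
  | none => none
  | some l => some (pvLoopB none l)

-- ===== PRECONDITION & SPEC =====
def Spec_normalize_argv_py (argv : Option (List String)) (out : Option (List String)) : Prop := out = normalize_argv_py_alt argv
instance (argv : Option (List String)) (out : Option (List String)) : Decidable (Spec_normalize_argv_py argv out) := by unfold Spec_normalize_argv_py; infer_instance

-- ===== CLAIM (what is proved, stated in full; the proofs are below) =====
def Claim_equal_normalize_argv_py : Prop := ∀ (argv : Option (List String)), Dom_normalize_argv_py argv → Spec_normalize_argv_py argv (normalize_argv_py argv)

-- ===== LEMMAS AND PROOFS =====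

-- Joint invariant: B with no pending equals A, and B holding a pending option p
-- equals A restarted at p (only options ever become pending).
theorem pvLoop_eq (l : List String) :
    pvLoopA l = pvLoopB none l ∧
    ∀ p, pvExpects.contains p = true → pvLoopA (p :: l) = pvLoopB (some p) l := by
  induction l with
  | nil => exact ⟨rfl, fun p _ => rfl⟩
  | cons tok rest ih =>
    obtain ⟨ih1, ih2⟩ := ih
    have h1 : pvLoopA (tok :: rest) = pvLoopB none (tok :: rest) := by
      by_cases hc : pvExpects.contains tok = true
      · rw [pvLoopB, if_pos hc, ← ih2 tok hc]
      · have hA : pvLoopA (tok :: rest) = tok :: pvLoopA rest := by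
          cases rest with
          | nil => rfl
          | cons nxt r =>
            rw [pvLoopA, if_neg (by rw [Bool.and_eq_true]; exact fun hx => hc hx.1)]
        rw [hA, ih1, pvLoopB, if_neg hc]
    refine ⟨h1, fun p hp => ?_⟩
    rw [pvLoopA]
    by_cases hd : pvDashTest tok = true
    · rw [if_pos (by rw [hp, hd]; rfl), pvLoopB, if_pos hd, ih1]
    · rw [if_neg (by rw [Bool.and_eq_true]; exact fun hx => hd hx.2), pvLoopB, if_neg hd, h1, pvLoopB]

-- ===== VERDICT (by name: the statement is the Claim_ definition above) =====
theorem normalize_argv_py_spec : Claim_equal_normalize_argv_py := by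
  intro argv _
  unfold Spec_normalize_argv_py
  cases argv with
  | none => rfl
  | some l => exact congrArg some (pvLoop_eq l).1
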